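-- pv_equiv track=rewrite | github.com/Boty22/Spam-Filtering | perceptron.py | createDataStructure
-- ===== SOURCE A (Python) =====
-- def createDataStructure(vocabulary,samples):
--     X_matrix = []
--     Y_vector = []
--     for sample in samples:
--         Xl = [1]
--         Yl = sample[1]
--         for word in vocabulary:
--             if word in sample[0]:
--                 Xl.append(1)
--             else:
--                 Xl.append(0)
--         X_matrix.append(Xl)
--         Y_vector.append(Yl)
--     return X_matrix, Y_vector
-- ===== SOURCE B (Python) =====
-- def createDataStructure(vocabulary, samples):
--     # Inverted index: word -> all positions where it occurs in vocabulary.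
--     index = {}
--     for i, word in enumerate(vocabulary):
--         index.setdefault(word, []).append(i)
--     n = len(vocabulary)
--     X_matrix = []
--     Y_vector = []
--     for sample in samples:
--         positions = set()
--         for word in dict.fromkeys(sample[0]):
--             positions.update(index.get(word, ()))
--         X_matrix.append([1] + [1 if i in positions else 0 for i in range(n)])
--         Y_vector.append(sample[1])
--     return X_matrix, Y_vector
-- ===== Notes on version B (the rewrite author's own statement) =====
-- stated objective: alternative
-- what changed: Replaces A's per-sample scan of the whole vocabulary (list-membership test of each vocabulary word in the sample's words) with a precomputed inverted index word->positions and a per-sample position set driven by the sample's deduplicated words, emitting the row from the position set.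
import Mathlib
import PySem

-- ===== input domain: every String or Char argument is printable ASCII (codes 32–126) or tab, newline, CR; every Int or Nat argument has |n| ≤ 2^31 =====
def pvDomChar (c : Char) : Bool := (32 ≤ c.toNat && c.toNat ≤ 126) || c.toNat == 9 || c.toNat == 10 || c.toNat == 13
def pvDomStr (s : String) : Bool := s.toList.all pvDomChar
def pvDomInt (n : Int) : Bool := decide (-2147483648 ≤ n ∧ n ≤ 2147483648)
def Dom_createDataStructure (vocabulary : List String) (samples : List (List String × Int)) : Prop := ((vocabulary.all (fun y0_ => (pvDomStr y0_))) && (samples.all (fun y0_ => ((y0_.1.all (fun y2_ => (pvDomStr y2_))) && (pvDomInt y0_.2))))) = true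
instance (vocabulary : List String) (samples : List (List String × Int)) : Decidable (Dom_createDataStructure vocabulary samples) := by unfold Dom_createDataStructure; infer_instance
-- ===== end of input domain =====

-- B replaces A's per-sample scan of the whole vocabulary by a precomputed inverted
-- index (word -> vocabulary positions) plus a per-sample position set driven by the
-- sample's (deduplicated) words; identical return values (objective: alternative).

-- ===== PORT A =====
def createDataStructure (vocabulary : List String) (samples : List (List String × Int)) : List (List Int) × List Int :=
  samples.foldl
    (fun acc sample =>
      let Xl : List Int :=
        vocabulary.foldl (fun xl word => xl ++ [if word ∈ sample.1 then (1 : Int) else 0]) [1]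
      (acc.1 ++ [Xl], acc.2 ++ [sample.2]))
    ([], [])

-- ===== PORT B =====
-- index.setdefault(word, []).append(i)  ==  index[word] = index.get(word, []) + [i]  ==  Dict.modify
def cdsIndex (vocabulary : List String) : PySem.Dict String (List Int) :=
  (PySem.List.enumerate vocabulary).foldl
    (fun d p => d.modify p.2 [] (fun l => l ++ [p.1])) PySem.Dict.empty

def createDataStructure_alt (vocabulary : List String) (samples : List (List String × Int)) : List (List Int) × List Int :=
  let index := cdsIndex vocabulary
  let n := vocabulary.length
  samples.foldl
    (fun acc sample =>
      let positions : PySem.Set Int :=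
        (PySem.List.dedup sample.1).foldl
          (fun s word => PySem.Set.update s (index.getD word [])) PySem.Set.empty
      (acc.1 ++ [1 :: (PySem.List.pyRange 0 n 1).map (fun i => if i ∈ positions then (1 : Int) else 0)],
       acc.2 ++ [sample.2]))
    ([], [])

-- ===== PRECONDITION & SPEC =====
def Spec_createDataStructure (vocabulary : List String) (samples : List (List String × Int)) (out : List (List Int) × List Int) : Prop := out = createDataStructure_alt vocabulary samples
instance (vocabulary : List String) (samples : List (List String × Int)) (out : List (List Int) × List Int) : Decidable (Spec_createDataStructure vocabulary samples out) := by unfold Spec_createDataStructure; infer_instance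

-- ===== CLAIM (what is proved, stated in full; the proofs are below) =====
def Claim_equal_createDataStructure : Prop := ∀ (vocabulary : List String) (samples : List (List String × Int)), Dom_createDataStructure vocabulary samples → Spec_createDataStructure vocabulary samples (createDataStructure vocabulary samples)

-- ===== LEMMAS AND PROOFS =====

-- The inverted index maps a word to exactly the positions where it occurs in vocabulary.
theorem mem_cdsIndex_getD (vocabulary : List String) (w : String) (i : Int) :
    i ∈ (cdsIndex vocabulary).getD w [] ↔
      ∃ (k : Nat) (h : k < vocabulary.length), i = (k : Int) ∧ vocabulary[k] = w := by
  have hswap :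
      (PySem.List.enumerate vocabulary).foldl
          (fun d p => d.modify p.2 [] (fun l => l ++ [p.1])) PySem.Dict.empty
        = ((PySem.List.enumerate vocabulary).map Prod.swap).foldl
          (fun d p => d.modify p.1 [] (fun l => l ++ [p.2])) PySem.Dict.empty := by
    rw [List.foldl_map]
    simp only [Prod.fst_swap, Prod.snd_swap]
  unfold cdsIndex
  rw [hswap, PySem.Dict.getD_foldl_modify_append,
    show (PySem.Dict.empty : PySem.Dict String (List Int)).getD w [] = [] from rfl,
    List.nil_append]
  simp only [List.mem_map, List.mem_filter, PySem.List.mem_enumerate_iff]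
  constructor
  · rintro ⟨p, ⟨⟨q, ⟨k, hk, rfl⟩, rfl⟩, hw⟩, rfl⟩
    exact ⟨k, hk, by simp, by simpa using hw⟩
  · rintro ⟨k, hk, rfl, hw⟩
    exact ⟨Prod.swap (0 + (k : Int), vocabulary[k]),
      ⟨⟨(0 + (k : Int), vocabulary[k]), ⟨k, hk, rfl⟩, rfl⟩, by simpa using hw⟩, by simp⟩

-- Membership in the position set accumulated from a list of words.
theorem mem_positions_foldl (g : String → List Int) (ws : List String) (s : PySem.Set Int) (i : Int) :
    i ∈ ws.foldl (fun s word => PySem.Set.update s (g word)) s ↔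
      i ∈ s ∨ ∃ w ∈ ws, i ∈ g w := by
  induction ws generalizing s with
  | nil => simp
  | cons w ws ih =>
    simp only [List.foldl_cons, ih, PySem.Set.mem_update, List.mem_cons]
    constructor
    · rintro ((h | h) | ⟨w', hw', h⟩)
      · exact Or.inl h
      · exact Or.inr ⟨w, Or.inl rfl, h⟩
      · exact Or.inr ⟨w', Or.inr hw', h⟩
    · rintro (h | ⟨w', (rfl | hw'), h⟩)
      · exact Or.inl (Or.inl h)
      · exact Or.inl (Or.inr h)
      · exact Or.inr ⟨w', hw', h⟩

-- Per-sample row equality: A's vocabulary scan equals B's index-driven row.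
theorem row_eq (vocabulary : List String) (ws : List String) :
    vocabulary.foldl (fun xl word => xl ++ [if word ∈ ws then (1 : Int) else 0]) [1]
      = 1 :: (PySem.List.pyRange 0 vocabulary.length 1).map
          (fun i => if i ∈ (PySem.List.dedup ws).foldl
              (fun s word => PySem.Set.update s ((cdsIndex vocabulary).getD word [])) PySem.Set.empty
            then (1 : Int) else 0) := by
  rw [PySem.List.foldl_append_singleton_eq_map, PySem.List.pyRange_zero_natCast, List.map_map]
  have htail : (List.range vocabulary.length).map
        ((fun i => if i ∈ (PySem.List.dedup ws).foldl
            (fun s word => PySem.Set.update s ((cdsIndex vocabulary).getD word [])) PySem.Set.empty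
          then (1 : Int) else 0) ∘ (fun k : Nat => (k : Int)))
      = vocabulary.map (fun word => if word ∈ ws then (1 : Int) else 0) := by
    apply List.ext_getElem (by simp)
    intro k h1 h2
    have hk : k < vocabulary.length := by simpa using h1
    simp only [List.getElem_map, List.getElem_range, Function.comp]
    have hmem : ((k : Int) ∈ (PySem.List.dedup ws).foldl
        (fun s word => PySem.Set.update s ((cdsIndex vocabulary).getD word [])) PySem.Set.empty)
        ↔ vocabulary[k] ∈ ws := by
      rw [mem_positions_foldl]
      simp only [PySem.Set.empty, List.not_mem_nil, false_or, PySem.List.mem_dedup,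
        mem_cdsIndex_getD]
      constructor
      · rintro ⟨w, hw, k', hk'', hkk, hv⟩
        have hkeq : k' = k := by exact_mod_cast hkk.symm
        subst hkeq; subst hv; exact hw
      · intro h
        exact ⟨vocabulary[k], h, k, hk, rfl, rfl⟩
    exact if_congr hmem rfl rfl
  rw [htail]
  rfl

-- ===== VERDICT (by name: the statement is the Claim_ definition above) =====
theorem createDataStructure_spec : Claim_equal_createDataStructure := by
  intro vocabulary samples _
  unfold Spec_createDataStructure
  simp only [createDataStructure, createDataStructure_alt]
  refine PySem.List.foldl_congr_mem _ _ _ _ ?_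
  intro acc sample _
  rw [row_eq]
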